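-- pv_equiv track=rewrite | github.com/vieTins/py | Contest/Contest3/Bai1.py | check
-- ===== SOURCE A (Python) =====
-- def check (a):
--      countLe , countChan , sumLe , sumChan = 0 , 0 , 0 , 0
--      for i in range(len(a)) :
--         if (a[i] % 2 == 0) :
--             countChan += 1
--             sumChan += a[i]
--         else :
--             countLe += 1
--             sumLe += a[i]
--      return countLe , countChan , sumLe , sumChan
-- ===== SOURCE B (Python) =====
-- def check(a):
--     evens = [x for x in a if x % 2 == 0]
--     odds = [x for x in a if x % 2 != 0]
--     return len(odds), len(evens), sum(odds), sum(evens)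
-- ===== Notes on version B (the rewrite author's own statement) =====
-- stated objective: simpler
-- what changed: Replaces the fused index loop with four branch-updated accumulators by a partition into evens/odds followed by built-in len/sum reductions.
import Mathlib
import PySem

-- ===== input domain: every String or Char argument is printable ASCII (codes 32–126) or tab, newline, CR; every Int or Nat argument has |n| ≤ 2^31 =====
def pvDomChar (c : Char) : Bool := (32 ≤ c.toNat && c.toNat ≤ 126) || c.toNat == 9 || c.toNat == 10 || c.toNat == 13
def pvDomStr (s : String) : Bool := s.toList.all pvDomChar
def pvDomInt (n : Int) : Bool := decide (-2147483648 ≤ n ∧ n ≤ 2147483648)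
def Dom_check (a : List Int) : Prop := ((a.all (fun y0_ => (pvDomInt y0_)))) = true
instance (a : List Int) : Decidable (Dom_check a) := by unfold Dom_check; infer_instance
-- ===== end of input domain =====

-- ===== PORT A =====
-- B replaces A's fused index loop with a partition into evens/odds followed by len/sum reductions.
def check (a : List Int) : Int × Int × Int × Int :=
  (PySem.List.pyRange 0 a.length 1).foldl
    (fun (st : Int × Int × Int × Int) i =>
      if PySem.Int.mod (PySem.List.pyGetD a i 0) 2 == 0 then
        (st.1, st.2.1 + 1, st.2.2.1, st.2.2.2 + PySem.List.pyGetD a i 0)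
      else
        (st.1 + 1, st.2.1, st.2.2.1 + PySem.List.pyGetD a i 0, st.2.2.2))
    (0, 0, 0, 0)

-- ===== PORT B =====
def check_alt (a : List Int) : Int × Int × Int × Int :=
  let evens := a.filter (fun x => PySem.Int.mod x 2 == 0)
  let odds := a.filter (fun x => PySem.Int.mod x 2 != 0)
  ((odds.length : Int), (evens.length : Int), odds.sum, evens.sum)

-- ===== PRECONDITION & SPEC =====
def Spec_check (a : List Int) (out : Int × Int × Int × Int) : Prop := out = check_alt a
instance (a : List Int) (out : Int × Int × Int × Int) : Decidable (Spec_check a out) := by unfold Spec_check; infer_instance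

-- ===== CLAIM (what is proved, stated in full; the proofs are below) =====
def Claim_equal_check : Prop := ∀ (a : List Int), Dom_check a → Spec_check a (check a)

-- ===== LEMMAS AND PROOFS =====
lemma check_loop_eq (a : List Int) (c1 c2 s1 s2 : Int) :
    a.foldl
      (fun (st : Int × Int × Int × Int) x =>
        if PySem.Int.mod x 2 == 0 then
          (st.1, st.2.1 + 1, st.2.2.1, st.2.2.2 + x)
        else
          (st.1 + 1, st.2.1, st.2.2.1 + x, st.2.2.2))
      (c1, c2, s1, s2)
    = (c1 + ((a.filter (fun x => PySem.Int.mod x 2 != 0)).length : Int),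
       c2 + ((a.filter (fun x => PySem.Int.mod x 2 == 0)).length : Int),
       s1 + (a.filter (fun x => PySem.Int.mod x 2 != 0)).sum,
       s2 + (a.filter (fun x => PySem.Int.mod x 2 == 0)).sum) := by
  induction a generalizing c1 c2 s1 s2 with
  | nil => simp
  | cons h t ih =>
    rw [List.foldl_cons]
    by_cases hp : PySem.Int.mod h 2 == 0
    · have hm : h % 2 = 0 := by
        simp [PySem.Int.mod, Int.fmod_eq_emod] at hp; omega
      rw [if_pos hp, ih]
      simp [PySem.Int.mod, Int.fmod_eq_emod, hm, Prod.ext_iff]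
      and_intros <;> ring
    · have hm : h % 2 = 1 := by
        simp [PySem.Int.mod, Int.fmod_eq_emod] at hp; omega
      rw [if_neg hp, ih]
      simp [PySem.Int.mod, Int.fmod_eq_emod, hm, Prod.ext_iff]
      and_intros <;> ring

-- ===== VERDICT (by name: the statement is the Claim_ definition above) =====
theorem check_spec : Claim_equal_check := by
  intro a _
  unfold Spec_check check check_alt
  rw [PySem.List.foldl_pyRange_zero_pyGetD' a 0
    (fun (st : Int × Int × Int × Int) x =>
      if PySem.Int.mod x 2 == 0 then
        (st.1, st.2.1 + 1, st.2.2.1, st.2.2.2 + x)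
      else
        (st.1 + 1, st.2.1, st.2.2.1 + x, st.2.2.2)) (0,0,0,0)]
  rw [check_loop_eq]
  simp
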